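-- pv_equiv track=rewrite | github.com/reasonableplan/agent-orchestration | skills/ha-review/run.py | _strip_non_code_from_diff
-- ===== SOURCE A (Python) =====
-- def _strip_non_code_from_diff(diff: str) -> str:
--     """git diff 에서 코드 파일 블록만 남김 (문서/템플릿 placeholder 를 ai-slop 로 오탐 방지).
--
--     제외 대상:
--     - `docs/` 경로 (skeleton.md, harness-plan.md, AGENTS.md, README 등)
--     - `*.md` 확장자
--     - `templates/` 경로의 조각
--     - `.harness-backup-*` 백업 파일
--     """
--     if not diff:
--         return diff
--     lines = diff.splitlines(keepends=True)
--     out: list[str] = []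
--     skip = False
--     for line in lines:
--         if line.startswith("diff --git "):
--             # 파일 헤더: "diff --git a/<path> b/<path>"
--             parts = line.split(" b/", 1)
--             path = parts[1].strip() if len(parts) == 2 else ""
--             skip = (
--                 path.endswith(".md")
--                 or "/docs/" in path
--                 or "/templates/" in path
--                 or ".harness-backup-" in path
--                 or path.startswith("docs/")
--                 or path.startswith("templates/")
--             )
--         if not skip:
--             out.append(line)
--     return "".join(out)
-- ===== SOURCE B (Python) =====
-- def _line_end(diff, i):
--     # index just past the line starting at i (line breaks: "\n", "\r", "\r\n")
--     n = len(diff)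
--     j = i
--     while j < n and diff[j] != "\n" and diff[j] != "\r":
--         j += 1
--     if j < n:
--         j += 2 if diff.startswith("\r\n", j) else 1
--     return j
--
--
-- def _block_excluded(header_line):
--     # header_line = "diff --git a/<path> b/<path>\n"; path after the first " b/"
--     path = header_line.partition(" b/")[2].strip()
--     return (
--         path.endswith(".md")
--         or "/docs/" in path
--         or "/templates/" in path
--         or ".harness-backup-" in path
--         or path.startswith("docs/")
--         or path.startswith("templates/")
--     )
--
--
-- def _strip_non_code_from_diff(diff: str) -> str:
--     """Slice the raw diff into blocks at 'diff --git ' header line starts and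
--     keep or drop each block whole (lines before the first header always kept)."""
--     if not diff:
--         return diff
--     pieces = []
--     i, n = 0, len(diff)
--     while i < n:
--         j = _line_end(diff, i)
--         if diff.startswith("diff --git ", i):
--             # file block: header line plus everything up to the next header line
--             k = j
--             while k < n and not diff.startswith("diff --git ", k):
--                 k = _line_end(diff, k)
--             if not _block_excluded(diff[i:j]):
--                 pieces.append(diff[i:k])
--             i = k
--         else:
--             pieces.append(diff[i:j])
--             i = j
--     return "".join(pieces)
-- ===== Notes on version B (the rewrite author's own statement) =====
-- stated objective: alternative
-- what changed: B slices the raw diff string into whole file blocks at git file-header line starts (header test by raw prefix match at the line start, path parsed via str.partition) and keeps or drops each block wholesale, instead of A's splitlines pass filtered line by line through a skip flag.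
import Mathlib
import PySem

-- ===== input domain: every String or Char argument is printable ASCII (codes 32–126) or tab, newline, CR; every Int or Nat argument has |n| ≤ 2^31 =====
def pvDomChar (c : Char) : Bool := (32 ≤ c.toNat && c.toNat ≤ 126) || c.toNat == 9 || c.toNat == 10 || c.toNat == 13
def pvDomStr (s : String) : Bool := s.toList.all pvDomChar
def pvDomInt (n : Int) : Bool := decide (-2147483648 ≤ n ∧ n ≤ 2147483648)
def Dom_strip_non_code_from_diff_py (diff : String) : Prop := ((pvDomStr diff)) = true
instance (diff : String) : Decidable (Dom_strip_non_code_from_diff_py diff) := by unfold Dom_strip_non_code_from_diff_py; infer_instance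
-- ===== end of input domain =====

-- B slices the raw character stream into whole file blocks at 'diff --git ' header line
-- starts (no splitlines pass, no per-line skip flag); objective: alternative decomposition.

-- Shared hand port of one step of line splitting (Python's line breaks restricted to the
-- input domain, where only '\n', '\r' and '\r\n' occur): the first line (keepends) and the rest.
def pvTakeLine : List Char → List Char × List Char
  | [] => ([], [])
  | c :: rest =>
    if c = '\n' then ([c], rest)
    else if c = '\r' then
      match rest with
      | '\n' :: rest' => (['\r', '\n'], rest')
      | _ => (['\r'], rest)
    else
      let (l, r) := pvTakeLine rest
      (c :: l, r)

-- ===== PORT A =====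
-- Hand port of diff.splitlines(keepends=True), exact on the input domain (see pvTakeLine);
-- fuel = number of characters, enough since every line is nonempty.
def pvLinesF : Nat → List Char → List (List Char)
  | 0, _ => []
  | _ + 1, [] => []
  | f + 1, c :: rest =>
    let (l, r) := pvTakeLine (c :: rest)
    l :: pvLinesF f r

-- line.startswith("diff --git ")
def pvIsHeader (l : List Char) : Bool := PySem.Chars.startswith l "diff --git ".toList

-- A's inline header test: parts = line.split(" b/", 1); path = parts[1].strip() if
-- len(parts) == 2 else ""; then the six path conditions.
def pvExcluded (l : List Char) : Bool :=
  let parts := PySem.Chars.splitOnMax l (" b/".toList) 1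
  let path := if parts.length == 2 then PySem.Chars.strip (parts.getD 1 []) else []
  PySem.Chars.endswith path ".md".toList
    || PySem.Chars.isIn "/docs/".toList path
    || PySem.Chars.isIn "/templates/".toList path
    || PySem.Chars.isIn ".harness-backup-".toList path
    || PySem.Chars.startswith path "docs/".toList
    || PySem.Chars.startswith path "templates/".toList

-- the body of A's for-loop over lines, state (skip, out)
def pvAStep (st : Bool × List (List Char)) (line : List Char) : Bool × List (List Char) :=
  let skip := if pvIsHeader line then pvExcluded line else st.1
  (skip, if skip then st.2 else st.2 ++ [line])

def strip_non_code_from_diff_py (diff : String) : String :=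
  if diff.toList = [] then diff
  else
    let lines := pvLinesF diff.toList.length diff.toList
    String.ofList (PySem.Chars.join [] ((lines.foldl pvAStep (false, [])).2))

-- ===== PORT B =====
-- Source B's ' '.strip() whitespace test, written on code points: exact on the input domain,
-- where the only whitespace characters are space, tab, '\n', '\r'.
def pvBws (c : Char) : Bool := c.toNat == 32 || c.toNat == 9 || c.toNat == 10 || c.toNat == 13

def pvBStrip (cs : List Char) : List Char :=
  ((cs.dropWhile pvBws).reverse.dropWhile pvBws).reverse

-- hand port of header_line.partition(" b/")[2]: the part after the first occurrence of
-- sep, [] when sep does not occur (exact: partition scans for the first occurrence).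
def pvBAfter (sep : List Char) : List Char → List Char
  | [] => []
  | c :: rest =>
    if sep.isPrefixOf (c :: rest) then (c :: rest).drop sep.length
    else pvBAfter sep rest

-- hand port of Python's substring test 'sub in s' (scan for a first occurrence)
def pvBContains (sub : List Char) : List Char → Bool
  | [] => sub.isEmpty
  | c :: rest => sub.isPrefixOf (c :: rest) || pvBContains sub rest

-- Source B's _block_excluded on the header line
def pvBHeaderBad (l : List Char) : Bool :=
  let path := pvBStrip (pvBAfter " b/".toList l)
  ".md".toList.isSuffixOf path
    || pvBContains "/docs/".toList path
    || pvBContains "/templates/".toList path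
    || pvBContains ".harness-backup-".toList path
    || "docs/".toList.isPrefixOf path
    || "templates/".toList.isPrefixOf path

-- Source B's inner while: consume whole lines up to the next header line start (or the end);
-- returns (consumed characters, remaining suffix). fuel = character count bound.
def pvBSkipToHeader : Nat → List Char → List Char × List Char
  | 0, cs => ([], cs)
  | f + 1, cs =>
    if cs = [] ∨ "diff --git ".toList.isPrefixOf cs then ([], cs)
    else
      let (l, r) := pvTakeLine cs
      let (b, rem) := pvBSkipToHeader f r
      (l ++ b, rem)

-- Source B's outer while over the raw characters: at a header line start take the whole block
-- (header line + following non-header lines) and keep or drop it; otherwise keep the line.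
def pvBGo : Nat → List Char → List Char
  | 0, _ => []
  | _ + 1, [] => []
  | f + 1, c :: cs' =>
    let (line, rest) := pvTakeLine (c :: cs')
    if "diff --git ".toList.isPrefixOf (c :: cs') then
      let (body, rem) := pvBSkipToHeader f rest
      (if pvBHeaderBad line then [] else line ++ body) ++ pvBGo f rem
    else
      line ++ pvBGo f rest

def strip_non_code_from_diff_py_alt (diff : String) : String :=
  if diff.toList = [] then diff
  else String.ofList (pvBGo diff.toList.length diff.toList)

-- ===== PRECONDITION & SPEC =====
def Spec_strip_non_code_from_diff_py (diff : String) (out : String) : Prop := out = strip_non_code_from_diff_py_alt diff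
instance (diff : String) (out : String) : Decidable (Spec_strip_non_code_from_diff_py diff out) := by unfold Spec_strip_non_code_from_diff_py; infer_instance

-- ===== CLAIM (what is proved, stated in full; the proofs are below) =====
def Claim_equal_strip_non_code_from_diff_py : Prop := ∀ (diff : String), Dom_strip_non_code_from_diff_py diff → Spec_strip_non_code_from_diff_py diff (strip_non_code_from_diff_py diff)

-- ===== LEMMAS AND PROOFS =====

-- basic facts about pvTakeLine
lemma pvTakeLine_append : ∀ cs : List Char, (pvTakeLine cs).1 ++ (pvTakeLine cs).2 = cs := by
  intro cs
  induction cs with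
  | nil => rfl
  | cons c rest ih =>
    by_cases h1 : c = '\n'
    · subst h1; simp [pvTakeLine]
    · by_cases h2 : c = '\r'
      · subst h2
        cases rest with
        | nil => simp [pvTakeLine]
        | cons d rest' =>
          by_cases h3 : d = '\n'
          · subst h3; simp [pvTakeLine]
          · simp [pvTakeLine, h3]
      · simp [pvTakeLine, h1, h2] at ih ⊢
        exact ih

lemma pvTakeLine_fst_ne_nil : ∀ cs : List Char, cs ≠ [] → (pvTakeLine cs).1 ≠ [] := by
  intro cs h
  cases cs with
  | nil => exact absurd rfl h
  | cons c rest =>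
    by_cases h1 : c = '\n'
    · subst h1; simp [pvTakeLine]
    · by_cases h2 : c = '\r'
      · subst h2
        cases rest with
        | nil => simp [pvTakeLine]
        | cons d rest' =>
          by_cases h3 : d = '\n'
          · subst h3; simp [pvTakeLine]
          · simp [pvTakeLine, h3]
      · simp [pvTakeLine, h1, h2]

lemma pvTakeLine_snd_lt : ∀ cs : List Char, cs ≠ [] → (pvTakeLine cs).2.length < cs.length := by
  intro cs h
  have ha := pvTakeLine_append cs
  have hf := pvTakeLine_fst_ne_nil cs h
  have hsum : (pvTakeLine cs).1.length + (pvTakeLine cs).2.length = cs.length := by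
    conv_rhs => rw [← ha]
    simp
  have : 0 < (pvTakeLine cs).1.length := List.length_pos_iff.mpr hf
  omega

-- a pattern without line-break characters is a prefix of the first line iff of the string
lemma pvPrefix_takeLine (p : List Char) (hp : ∀ c ∈ p, c ≠ '\n' ∧ c ≠ '\r') :
    ∀ cs : List Char, p.isPrefixOf (pvTakeLine cs).1 = p.isPrefixOf cs := by
  induction p with
  | nil => intro cs; simp [List.isPrefixOf]
  | cons a p' ih =>
    intro cs
    have ha := hp a (by simp)
    have hp' : ∀ c ∈ p', c ≠ '\n' ∧ c ≠ '\r' := fun c hc => hp c (by simp [hc])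
    cases cs with
    | nil => simp [pvTakeLine, List.isPrefixOf]
    | cons c rest =>
      by_cases h1 : c = '\n'
      · subst h1
        have : (a == '\n') = false := by simp [ha.1]
        simp [pvTakeLine, List.isPrefixOf, this]
      · by_cases h2 : c = '\r'
        · subst h2
          have : (a == '\r') = false := by simp [ha.2]
          cases rest with
          | nil => simp [pvTakeLine, List.isPrefixOf, this]
          | cons d rest' =>
            by_cases h3 : d = '\n'
            · subst h3; simp [pvTakeLine, List.isPrefixOf, this]
            · simp [pvTakeLine, h3, List.isPrefixOf, this]
        · by_cases h4 : a = c
          · subst h4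
            simp [pvTakeLine, h1, h2, List.isPrefixOf]
            exact ih hp' rest
          · have : (a == c) = false := by simp [h4]
            simp [pvTakeLine, h1, h2, List.isPrefixOf, this]

lemma pvHeader_takeLine (cs : List Char) :
    "diff --git ".toList.isPrefixOf (pvTakeLine cs).1 = "diff --git ".toList.isPrefixOf cs := by
  apply pvPrefix_takeLine
  have h : "diff --git ".toList = ['d','i','f','f',' ','-','-','g','i','t',' '] := by rfl
  rw [h]
  intro c hc
  simp only [List.mem_cons, List.not_mem_nil, or_false] at hc
  rcases hc with rfl|rfl|rfl|rfl|rfl|rfl|rfl|rfl|rfl|rfl|rfl <;> exact ⟨by decide, by decide⟩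

-- fuel irrelevance for pvLinesF
lemma pvLinesF_congr : ∀ f g cs, cs.length ≤ f → cs.length ≤ g → pvLinesF f cs = pvLinesF g cs := by
  intro f
  induction f with
  | zero =>
    intro g cs hf _
    have : cs = [] := List.eq_nil_of_length_eq_zero (Nat.le_zero.mp hf)
    subst this
    cases g <;> rfl
  | succ f ih =>
    intro g cs hf hg
    cases cs with
    | nil => cases g <;> rfl
    | cons c rest =>
      cases g with
      | zero => simp at hg
      | succ g =>
        simp only [pvLinesF]
        have hlt := pvTakeLine_snd_lt (c :: rest) (by simp)
        have hlen : (pvTakeLine (c :: rest)).2.length ≤ f := by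
          simp only [List.length_cons] at hf hlt ⊢; omega
        have hlen' : (pvTakeLine (c :: rest)).2.length ≤ g := by
          simp only [List.length_cons] at hg hlt ⊢; omega
        rw [ih g _ hlen hlen']

def pvLines (cs : List Char) : List (List Char) := pvLinesF cs.length cs

lemma pvLines_cons (cs : List Char) (h : cs ≠ []) :
    pvLines cs = (pvTakeLine cs).1 :: pvLines (pvTakeLine cs).2 := by
  cases cs with
  | nil => exact absurd rfl h
  | cons c rest =>
    have hlt := pvTakeLine_snd_lt (c :: rest) (by simp)
    unfold pvLines
    simp only [List.length_cons, pvLinesF]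
    congr 1
    exact pvLinesF_congr rest.length _ _ (by simp only [List.length_cons] at hlt; omega) le_rfl

-- A's loop, written as a recursion over the remaining lines
def pvAGo : List (List Char) → Bool → List (List Char)
  | [], _ => []
  | l :: rest, skip =>
    let sk := if pvIsHeader l then pvExcluded l else skip
    if sk then pvAGo rest sk else l :: pvAGo rest sk

lemma pvFoldA (ls : List (List Char)) : ∀ (skip : Bool) (out : List (List Char)),
    (ls.foldl pvAStep (skip, out)).2 = out ++ pvAGo ls skip := by
  induction ls with
  | nil => intro skip out; simp [pvAGo]
  | cons l rest ih =>
    intro skip out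
    by_cases h : (if pvIsHeader l then pvExcluded l else skip) = true
    · have hs : pvAStep (skip, out) l = (true, out) := by simp [pvAStep, h]
      rw [List.foldl_cons, hs, ih]
      simp [pvAGo, h]
    · simp only [Bool.not_eq_true] at h
      have hs : pvAStep (skip, out) l = (false, out ++ [l]) := by simp [pvAStep, h]
      rw [List.foldl_cons, hs, ih]
      simp [pvAGo, h]

lemma pvAGo_seg (block : List (List Char)) : ∀ (rem : List (List Char)) (skip : Bool),
    (∀ x ∈ block, pvIsHeader x = false) →
    pvAGo (block ++ rem) skip = (if skip then [] else block) ++ pvAGo rem skip := by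
  induction block with
  | nil => intro rem skip _; simp
  | cons b bs ih =>
    intro rem skip h
    have hb : pvIsHeader b = false := h b (by simp)
    have hbs : ∀ x ∈ bs, pvIsHeader x = false := fun x hx => h x (by simp [hx])
    cases skip with
    | false => simp [pvAGo, hb, ih rem false hbs]
    | true => simp [pvAGo, hb, ih rem true hbs]

lemma pvAGo_head_header (l : List Char) (rest : List (List Char)) (s s' : Bool)
    (h : pvIsHeader l = true) : pvAGo (l :: rest) s = pvAGo (l :: rest) s' := by
  simp [pvAGo, h]

-- join with empty separator is flatten
lemma pvJoinNil : ∀ ls : List (List Char), PySem.Chars.join [] ls = ls.flatten := by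
  intro ls
  induction ls with
  | nil => rfl
  | cons a ls ih =>
    cases ls with
    | nil => simp [PySem.Chars.join, List.intercalate]
    | cons b ls' =>
      rw [PySem.Chars.join_cons_cons, ih]
      simp

-- characterisation of split(" b/", 1) via first-occurrence scanning
def pvBBefore (sep : List Char) : List Char → List Char
  | [] => []
  | c :: rest => if sep.isPrefixOf (c :: rest) then [] else c :: pvBBefore sep rest

lemma pvGoZero (sep : List Char) : ∀ fuel cs cur acc,
    PySem.Chars.splitOnMax.go sep fuel 0 cs cur acc = acc.reverse ++ [cur.reverse ++ cs] := by
  intro fuel cs cur acc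
  cases fuel with
  | zero => simp [PySem.Chars.splitOnMax.go]
  | succ f =>
    cases cs with
    | nil => simp [PySem.Chars.splitOnMax.go]
    | cons c rest => simp [PySem.Chars.splitOnMax.go]

lemma pvGoOne (sep : List Char) (hsep : sep ≠ []) : ∀ fuel cs cur acc, cs.length < fuel →
    PySem.Chars.splitOnMax.go sep fuel 1 cs cur acc =
      if pvBContains sep cs then acc.reverse ++ [cur.reverse ++ pvBBefore sep cs, pvBAfter sep cs]
      else acc.reverse ++ [cur.reverse ++ cs] := by
  intro fuel
  induction fuel with
  | zero => intro cs cur acc h; omega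
  | succ f ih =>
    intro cs cur acc h
    cases cs with
    | nil =>
      have : sep.isEmpty = false := by simpa [List.isEmpty_iff] using hsep
      simp [PySem.Chars.splitOnMax.go, pvBContains, this]
    | cons c rest =>
      by_cases hpre : sep.isPrefixOf (c :: rest) = true
      · simp only [PySem.Chars.splitOnMax.go, hpre, if_true]
        norm_num
        rw [pvGoZero]
        simp [pvBContains, pvBBefore, pvBAfter, hpre]
      · have hpre' : sep.isPrefixOf (c :: rest) = false := by
          rw [Bool.eq_false_iff]; exact hpre
        simp only [PySem.Chars.splitOnMax.go, hpre']
        norm_num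
        rw [ih rest (c :: cur) acc (by simp at h ⊢; omega)]
        simp only [pvBContains, pvBBefore, pvBAfter, hpre', Bool.false_or]
        by_cases hc : pvBContains sep rest = true <;> simp [hc]

lemma pvSplitOnMax_one (sep : List Char) (hsep : sep ≠ []) (l : List Char) :
    PySem.Chars.splitOnMax l sep 1 =
      if pvBContains sep l then [pvBBefore sep l, pvBAfter sep l] else [l] := by
  unfold PySem.Chars.splitOnMax
  norm_num
  rw [pvGoOne sep hsep (l.length + 1) l [] [] (by omega)]
  by_cases hc : pvBContains sep l = true <;> simp [hc]

lemma pvBAfter_of_not_has (sep : List Char) : ∀ l, pvBContains sep l = false → pvBAfter sep l = [] := by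
  intro l
  induction l with
  | nil => intro _; rfl
  | cons c rest ih =>
    intro h
    simp only [pvBContains, Bool.or_eq_false_iff] at h
    simp [pvBAfter, h.1, ih h.2]

-- whitespace tests agree on the domain
lemma pvWs_eq (c : Char) (h : pvDomChar c = true) : PySem.Chars.isspace c = pvBws c := by
  simp only [pvDomChar, Bool.or_eq_true, Bool.and_eq_true, decide_eq_true_eq, beq_iff_eq] at h
  rw [Bool.eq_iff_iff]
  simp only [PySem.Chars.isspace, pvBws, Bool.or_eq_true, Bool.and_eq_true, decide_eq_true_eq, beq_iff_eq]
  omega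

lemma pvDropWhile_congr (p q : Char → Bool) : ∀ l : List Char,
    (∀ c ∈ l, p c = q c) → l.dropWhile p = l.dropWhile q := by
  intro l
  induction l with
  | nil => intro _; rfl
  | cons c rest ih =>
    intro h
    have hc := h c (by simp)
    by_cases hp : p c = true
    · rw [List.dropWhile_cons_of_pos hp, List.dropWhile_cons_of_pos (hc ▸ hp),
        ih (fun x hx => h x (by simp [hx]))]
    · have hp' : p c = false := by rw [Bool.eq_false_iff]; exact hp
      rw [List.dropWhile_cons_of_neg (by simp [hp']), List.dropWhile_cons_of_neg (by simp [hc ▸ hp'])]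

lemma pvStrip_eq (l : List Char) (h : l.all pvDomChar = true) :
    PySem.Chars.strip l = pvBStrip l := by
  simp only [List.all_eq_true] at h
  unfold PySem.Chars.strip PySem.Chars.rstrip PySem.Chars.lstrip pvBStrip
  rw [pvDropWhile_congr _ _ l (fun c hc => pvWs_eq c (h c hc))]
  congr 1
  apply pvDropWhile_congr
  intro c hc
  apply pvWs_eq
  apply h
  have : c ∈ l.dropWhile pvBws := List.mem_reverse.mp hc
  exact (List.dropWhile_sublist pvBws).subset this

lemma pvBAfter_all (sep : List Char) (p : Char → Bool) :
    ∀ l : List Char, l.all p = true → (pvBAfter sep l).all p = true := by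
  intro l
  induction l with
  | nil => intro _; rfl
  | cons c rest ih =>
    intro h
    simp only [List.all_cons, Bool.and_eq_true] at h
    by_cases hpre : sep.isPrefixOf (c :: rest) = true
    · simp only [pvBAfter, hpre, if_true]
      have hall : (c :: rest).all p = true := by simp [h.1, h.2]
      simp only [List.all_eq_true] at hall ⊢
      intro x hx
      exact hall x (List.mem_of_mem_drop hx)
    · simp only [pvBAfter, hpre]
      exact ih h.2

lemma pvBContains_iff_infix (sub : List Char) : ∀ l, pvBContains sub l = true ↔ sub <:+: l := by
  intro l
  induction l with
  | nil => simp [pvBContains, List.isEmpty_iff]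
  | cons c rest ih =>
    simp only [pvBContains, Bool.or_eq_true, List.isPrefixOf_iff_prefix, ih, List.infix_cons_iff]

lemma pvIsIn_eq (sub s : List Char) : PySem.Chars.isIn sub s = pvBContains sub s := by
  by_cases h : sub <:+: s
  · rw [(PySem.Chars.isIn_iff_infix sub s).mpr h, ((pvBContains_iff_infix sub s).mpr h)]
  · rw [(PySem.Chars.isIn_eq_false_iff sub s).mpr h,
      Bool.eq_false_iff.mpr (fun hc => h ((pvBContains_iff_infix sub s).mp hc))]

-- the two header predicates agree on domain lines
lemma pvExcl_bridge (l : List Char) (h : l.all pvDomChar = true) :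
    pvExcluded l = pvBHeaderBad l := by
  unfold pvExcluded pvBHeaderBad
  rw [pvSplitOnMax_one " b/".toList (by decide) l]
  by_cases hc : pvBContains " b/".toList l = true
  · simp only [hc, if_true, List.length_cons, List.length_nil, List.getD_cons_succ, List.getD_cons_zero]
    norm_num
    rw [pvStrip_eq _ (pvBAfter_all _ pvDomChar l h)]
    simp [PySem.Chars.endswith, PySem.Chars.startswith, pvIsIn_eq]
  · have hc' : pvBContains " b/".toList l = false := by rw [Bool.eq_false_iff]; exact hc
    rw [pvBAfter_of_not_has _ l hc']
    simp only [hc']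
    norm_num
    decide

-- the skipped block: pvBSkipToHeader consumes exactly the non-header lines
lemma pvSkipT : ∀ f cs, cs.length ≤ f →
    ∃ ls, pvLines cs = ls ++ pvLines (pvBSkipToHeader f cs).2
      ∧ (∀ x ∈ ls, pvIsHeader x = false)
      ∧ ls.flatten = (pvBSkipToHeader f cs).1
      ∧ ls.flatten ++ (pvBSkipToHeader f cs).2 = cs
      ∧ ((pvBSkipToHeader f cs).2 = [] ∨
          "diff --git ".toList.isPrefixOf (pvBSkipToHeader f cs).2 = true) := by
  intro f
  induction f with
  | zero =>
    intro cs h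
    have : cs = [] := List.eq_nil_of_length_eq_zero (Nat.le_zero.mp h)
    subst this
    exact ⟨[], by simp [pvBSkipToHeader]⟩
  | succ f ih =>
    intro cs h
    by_cases hstop : cs = [] ∨ "diff --git ".toList.isPrefixOf cs
    · have hstep : pvBSkipToHeader (f + 1) cs = ([], cs) := by
        simp only [pvBSkipToHeader, hstop, if_true]
      refine ⟨[], by simp [hstep], by simp, by simp [hstep], by simp [hstep], ?_⟩
      rw [hstep]
      rcases hstop with h0 | h1
      · exact Or.inl h0
      · exact Or.inr h1
    · push Not at hstop
      have hne : cs ≠ [] := hstop.1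
      have hnp : "diff --git ".toList.isPrefixOf cs = false := by
        rw [Bool.eq_false_iff]; exact hstop.2
      have hstep : pvBSkipToHeader (f + 1) cs =
          ((pvTakeLine cs).1 ++ (pvBSkipToHeader f (pvTakeLine cs).2).1,
            (pvBSkipToHeader f (pvTakeLine cs).2).2) := by
        simp only [pvBSkipToHeader]
        rw [if_neg (fun hor => hor.elim (fun h0 => hne h0) (fun h1 => hstop.2 h1))]
      have hlen : (pvTakeLine cs).2.length ≤ f := by
        have := pvTakeLine_snd_lt cs hne; omega
      obtain ⟨ls, h1, h2, h3, h4, h5⟩ := ih (pvTakeLine cs).2 hlen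
      refine ⟨(pvTakeLine cs).1 :: ls, ?_, ?_, ?_, ?_, ?_⟩
      · rw [pvLines_cons cs hne, hstep]
        simp [h1]
      · intro x hx
        rcases List.mem_cons.mp hx with hx | hx
        · subst hx
          show PySem.Chars.startswith _ _ = false
          show "diff --git ".toList.isPrefixOf _ = false
          rw [pvHeader_takeLine cs]
          exact hnp
        · exact h2 x hx
      · rw [hstep]; simp [h3]
      · rw [hstep]
        simp only [List.flatten_cons, List.append_assoc]
        rw [h4]
        exact pvTakeLine_append cs
      · rw [hstep]; exact h5

-- main: A's filtered lines flatten to B's block output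
lemma pvMain : ∀ f cs, cs.length ≤ f → cs.all pvDomChar = true →
    (pvAGo (pvLines cs) false).flatten = pvBGo f cs := by
  intro f
  induction f with
  | zero =>
    intro cs h _
    have : cs = [] := List.eq_nil_of_length_eq_zero (Nat.le_zero.mp h)
    subst this
    rfl
  | succ f ih =>
    intro cs h hdom
    cases cs with
    | nil => rfl
    | cons c cs' =>
      have hne : (c :: cs') ≠ [] := by simp
      set line := (pvTakeLine (c :: cs')).1 with hline
      set rest := (pvTakeLine (c :: cs')).2 with hrest
      have happ : line ++ rest = c :: cs' := pvTakeLine_append (c :: cs')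
      have hdom2 : line.all pvDomChar = true ∧ rest.all pvDomChar = true := by
        have hd := hdom
        rw [← happ, List.all_append, Bool.and_eq_true] at hd
        exact hd
      have hdomline := hdom2.1
      have hdomrest := hdom2.2
      have hrestlen : rest.length ≤ f := by
        have h2l := pvTakeLine_snd_lt (c :: cs') hne
        rw [← hrest] at h2l
        simp only [List.length_cons] at h h2l
        omega
      have hlc := pvLines_cons (c :: cs') hne
      have hhead : pvIsHeader line = "diff --git ".toList.isPrefixOf (c :: cs') := by
        show "diff --git ".toList.isPrefixOf line = _
        exact pvHeader_takeLine (c :: cs')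
      by_cases hp : "diff --git ".toList.isPrefixOf (c :: cs') = true
      · -- header line: B takes the whole block
        have hih : pvIsHeader line = true := hhead.trans hp
        have hBgo : pvBGo (f + 1) (c :: cs') =
            (if pvBHeaderBad line then [] else
              line ++ (pvBSkipToHeader f rest).1) ++ pvBGo f (pvBSkipToHeader f rest).2 := by
          simp only [pvBGo, hp, if_true, ← hline, ← hrest]
        obtain ⟨ls, h1, h2, h3, h4, h5⟩ := pvSkipT f rest hrestlen
        set rem := (pvBSkipToHeader f rest).2 with hrem
        have hdomrem : rem.all pvDomChar = true := by
          have hd := hdomrest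
          rw [← h4, List.all_append, Bool.and_eq_true] at hd
          exact hd.2
        have hremlen : rem.length ≤ f := by
          have : ls.flatten.length + rem.length = rest.length := by
            rw [← h4]; simp
          omega
        have hAGorem : ∀ s : Bool, pvAGo (pvLines rem) s = pvAGo (pvLines rem) false := by
          intro s
          rcases h5 with h0 | h1
          · simp [h0, pvLines, pvLinesF, pvAGo]
          · have hnem : rem ≠ [] := by
              intro h0; rw [h0] at h1; exact absurd h1 (by decide)
            rw [pvLines_cons rem hnem]
            exact pvAGo_head_header _ _ s false
              (by show "diff --git ".toList.isPrefixOf _ = true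
                  rw [pvHeader_takeLine rem]; exact h1)
        have hbridge := pvExcl_bridge line hdomline
        rw [hlc, ← hline, ← hrest, h1]
        show (pvAGo (line :: (ls ++ pvLines rem)) false).flatten = _
        rw [hBgo]
        by_cases hex : pvExcluded line = true
        · -- excluded block: A skips every line of it
          have hskip : pvAGo (line :: (ls ++ pvLines rem)) false = pvAGo (pvLines rem) true := by
            simp only [pvAGo, hih, if_true, hex]
            exact pvAGo_seg ls (pvLines rem) true h2
          rw [hskip, hAGorem true, ih rem hremlen hdomrem]
          rw [← hbridge, hex]
          simp
        · have hex' : pvExcluded line = false := by rw [Bool.eq_false_iff]; exact hex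
          have hkeep : pvAGo (line :: (ls ++ pvLines rem)) false =
              line :: (ls ++ pvAGo (pvLines rem) false) := by
            simp only [pvAGo, hih, if_true, hex']
            rw [pvAGo_seg ls (pvLines rem) false h2]
            simp
          rw [hkeep]
          rw [← hbridge, hex']
          simp only [Bool.false_eq_true, if_false, List.flatten_cons, List.flatten_append]
          rw [h3, ih rem hremlen hdomrem]
          simp
      · -- ordinary line: both keep it
        have hih : pvIsHeader line = false := by rw [hhead, Bool.eq_false_iff]; exact hp
        have hp' : "diff --git ".toList.isPrefixOf (c :: cs') = false := by
          rw [Bool.eq_false_iff]; exact hp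
        have hBgo : pvBGo (f + 1) (c :: cs') = line ++ pvBGo f rest := by
          simp only [pvBGo, hp', Bool.false_eq_true, if_false, ← hline, ← hrest]
        rw [hlc, ← hline, ← hrest, hBgo]
        simp only [pvAGo, hih, Bool.false_eq_true, if_false, List.flatten_cons]
        rw [ih rest hrestlen hdomrest]

-- ===== VERDICT (by name: the statement is the Claim_ definition above) =====
theorem strip_non_code_from_diff_py_spec : Claim_equal_strip_non_code_from_diff_py := by
  unfold Claim_equal_strip_non_code_from_diff_py Spec_strip_non_code_from_diff_py
  intro diff hdom
  unfold strip_non_code_from_diff_py strip_non_code_from_diff_py_alt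
  by_cases h : diff.toList = []
  · simp [h]
  · simp only [h, if_false]
    have hdom' : diff.toList.all pvDomChar = true := hdom
    rw [pvFoldA, pvJoinNil]
    simp only [List.nil_append]
    rw [show pvLinesF diff.toList.length diff.toList = pvLines diff.toList from rfl]
    rw [pvMain diff.toList.length diff.toList le_rfl hdom']
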